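-- pv_equiv track=rewrite | github.com/MaayanWate/Secure-Gin-Rummy | backend/game.py | find_all_runs
-- ===== SOURCE A (Python) =====
-- def find_all_runs(cards_same_suit):
--     """
--     Finds all possible runs (sequences of 3 or more consecutive cards) within a given set of cards of the same suit.
--     """
--     if len(cards_same_suit) < 3:
--         return []
--     sorted_cards = sorted(cards_same_suit, key=lambda x: x[0])
--     results = []
--     def backtrack(start, current):
--         if start >= len(sorted_cards):
--             if len(current) >= 3:
--                 results.append(current[:])
--             return
--         if not current or sorted_cards[start][0] == current[-1][0] + 1:
--             current.append(sorted_cards[start])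
--             backtrack(start+1, current)
--             current.pop()
--         backtrack(start+1, current)
--     backtrack(0, [])
--     return [r for r in results if len(r) >= 3]
-- ===== SOURCE B (Python) =====
-- def find_all_runs(cards_same_suit):
--     """
--     Finds all possible runs (sequences of 3 or more consecutive cards) within a given set of cards of the same suit.
--     Grouping approach: sort, group equal values, and enumerate runs per start card through the
--     consecutive continuation groups (longest extensions first), instead of take/skip backtracking.
--     """
--     if len(cards_same_suit) < 3:
--         return []
--     cards = sorted(cards_same_suit, key=lambda c: c[0])
--     return _starts(_groups(cards))
--
--
-- def _groups(cards):
--     """Split a value-sorted card list into maximal groups of equal value."""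
--     if not cards:
--         return []
--     v = cards[0][0]
--     i = 1
--     while i < len(cards) and cards[i][0] == v:
--         i += 1
--     return [cards[:i]] + _groups(cards[i:])
--
--
-- def _cont(v, gs):
--     """Maximal prefix of gs whose group values are v, v+1, v+2, ..."""
--     if not gs or gs[0][0][0] != v:
--         return []
--     return [gs[0]] + _cont(v + 1, gs[1:])
--
--
-- def _emit(gs, run):
--     """All runs extending `run` with one card per group of gs (a prefix), extensions first."""
--     out = []
--     if gs:
--         for c in gs[0]:
--             out += _emit(gs[1:], run + [c])
--     if len(run) >= 3:
--         out.append(run)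
--     return out
--
--
-- def _starts(gs):
--     if not gs:
--         return []
--     g, rest = gs[0], gs[1:]
--     cont = _cont(g[0][0] + 1, rest)
--     out = []
--     for c in g:
--         out += _emit(cont, [c])
--     return out + _starts(rest)
-- ===== Notes on version B (the rewrite author's own statement) =====
-- stated objective: alternative
-- what changed: Replaced the take/skip backtracking over individual sorted cards by a structural enumeration: group equal values, find each start card's maximal consecutive continuation of groups, and emit runs by picking one card per group (extensions before shorter runs), reproducing A's DFS output order without dead skip branches.
import Mathlib
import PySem

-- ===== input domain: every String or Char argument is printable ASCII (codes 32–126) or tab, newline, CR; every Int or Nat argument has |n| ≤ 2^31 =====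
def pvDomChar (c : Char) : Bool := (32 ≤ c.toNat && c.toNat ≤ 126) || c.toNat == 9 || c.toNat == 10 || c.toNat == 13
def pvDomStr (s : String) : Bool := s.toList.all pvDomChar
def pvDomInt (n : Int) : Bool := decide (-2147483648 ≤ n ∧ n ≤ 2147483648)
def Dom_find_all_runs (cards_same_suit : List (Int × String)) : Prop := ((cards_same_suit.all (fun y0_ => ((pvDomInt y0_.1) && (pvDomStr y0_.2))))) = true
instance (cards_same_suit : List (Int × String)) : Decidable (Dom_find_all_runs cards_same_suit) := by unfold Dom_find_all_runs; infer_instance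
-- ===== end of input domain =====

-- B replaces A's take/skip backtracking by grouping equal values and enumerating each start's
-- consecutive continuation directly (alternative algorithm, same exact output list).

-- ===== PORT A =====
-- backtrack(start, current): recursion over the remaining sorted cards; results in DFS order
def pvBacktrack : List (Int × String) → List (Int × String) → List (List (Int × String))
  | [], current => if 3 ≤ current.length then [current] else []
  | c :: rest, current =>
      (if (match current.getLast? with
           | none => true
           | some l => c.1 == l.1 + 1) then pvBacktrack rest (current ++ [c]) else [])
      ++ pvBacktrack rest current

def find_all_runs (cards_same_suit : List (Int × String)) : List (List (Int × String)) :=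
  if cards_same_suit.length < 3 then []
  else
    let sorted_cards := PySem.List.sorted cards_same_suit (fun x => x.1) false
    (pvBacktrack sorted_cards []).filter (fun r => 3 ≤ r.length)

-- ===== PORT B =====
-- _groups: split the value-sorted list into maximal groups of equal value
def pvGroups : List (Int × String) → List (List (Int × String))
  | [] => []
  | c :: rest =>
      (c :: rest.takeWhile (fun x => x.1 == c.1)) :: pvGroups (rest.dropWhile (fun x => x.1 == c.1))
  termination_by xs => xs.length
  decreasing_by
    have := List.length_dropWhile_le (fun x => x.1 == c.1) rest
    simp; omega

-- _cont: maximal prefix of gs with group values v, v+1, …  (groups are never empty, so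
-- Python's gs[0][0] is the head; headD's default is never read)
def pvCont : Int → List (List (Int × String)) → List (List (Int × String))
  | _, [] => []
  | v, g :: gs => if (g.headD (0, "")).1 == v then g :: pvCont (v + 1) gs else []

-- _emit: runs extending `run` by one card per group of a prefix of gs, extensions first
def pvEmit (gs : List (List (Int × String))) (run : List (Int × String)) : List (List (Int × String)) :=
  match gs with
  | [] => if 3 ≤ run.length then [run] else []
  | g :: rest =>
      (g.flatMap fun c => pvEmit rest (run ++ [c])) ++ (if 3 ≤ run.length then [run] else [])
  termination_by gs.length

-- _starts: for each group (hence each start card, in sorted order) emit its runs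
def pvStarts : List (List (Int × String)) → List (List (Int × String))
  | [] => []
  | g :: rest =>
      (g.flatMap fun c => pvEmit (pvCont ((g.headD (0, "")).1 + 1) rest) [c]) ++ pvStarts rest

def find_all_runs_alt (cards_same_suit : List (Int × String)) : List (List (Int × String)) :=
  if cards_same_suit.length < 3 then []
  else pvStarts (pvGroups (PySem.List.sorted cards_same_suit (fun x => x.1) false))

-- ===== PRECONDITION & SPEC =====
def Spec_find_all_runs (cards_same_suit : List (Int × String)) (out : List (List (Int × String))) : Prop := out = find_all_runs_alt cards_same_suit
instance (cards_same_suit : List (Int × String)) (out : List (List (Int × String))) : Decidable (Spec_find_all_runs cards_same_suit out) := by unfold Spec_find_all_runs; infer_instance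

-- ===== CLAIM (what is proved, stated in full; the proofs are below) =====
def Claim_equal_find_all_runs : Prop := ∀ (cards_same_suit : List (Int × String)), Dom_find_all_runs cards_same_suit → Spec_find_all_runs cards_same_suit (find_all_runs cards_same_suit)

-- ===== LEMMAS AND PROOFS =====

lemma pvBacktrack_len (ys : List (Int × String)) :
    ∀ (cur : List (Int × String)), ∀ r ∈ pvBacktrack ys cur, 3 ≤ r.length := by
  induction ys with
  | nil =>
    intro cur r hr
    simp only [pvBacktrack] at hr
    split at hr <;> simp_all
  | cons c rest ih =>
    intro cur r hr
    simp only [pvBacktrack, List.mem_append] at hr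
    rcases hr with hr | hr
    · split at hr
      · exact ih _ r hr
      · split at hr
        · exact ih _ r hr
        · simp at hr
    · exact ih _ r hr

lemma pvBacktrack_skip (pre : List (Int × String)) (ys cur : List (Int × String))
    (l : Int × String) (h : cur.getLast? = some l) (hp : ∀ x ∈ pre, x.1 ≠ l.1 + 1) :
    pvBacktrack (pre ++ ys) cur = pvBacktrack ys cur := by
  induction pre with
  | nil => rfl
  | cons p pre' ih =>
    have hne : (p.1 == l.1 + 1) = false := by
      simp [hp p (by simp)]
    simp only [List.cons_append, pvBacktrack, h, hne]
    simpa using ih (fun x hx => hp x (by simp [hx]))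

lemma pvBacktrack_group (g : List (Int × String)) (ys cur : List (Int × String))
    (l : Int × String) (h : cur.getLast? = some l) (hg : ∀ x ∈ g, x.1 = l.1 + 1) :
    pvBacktrack (g ++ ys) cur
      = (g.flatMap fun d => pvBacktrack ys (cur ++ [d])) ++ pvBacktrack ys cur := by
  induction g with
  | nil => simp
  | cons d cs ih =>
    have hd : (d.1 == l.1 + 1) = true := by simp [hg d (by simp)]
    simp only [List.cons_append, pvBacktrack, h, hd, if_true]
    rw [pvBacktrack_skip cs ys (cur ++ [d]) d (by simp)
        (by intro x hx; rw [hg x (by simp [hx]), hg d (by simp)]; omega)]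
    rw [ih (fun x hx => hg x (by simp [hx]))]
    simp

lemma dropWhile_gt (c : Int × String) (rest : List (Int × String))
    (hpair : (c :: rest).Pairwise (fun a b => a.1 ≤ b.1)) :
    ∀ x ∈ rest.dropWhile (fun x => x.1 == c.1), c.1 < x.1 := by
  have hsub : List.Sublist (rest.dropWhile (fun x => x.1 == c.1)) rest := List.dropWhile_sublist _
  have hle : ∀ x ∈ rest, c.1 ≤ x.1 := (List.pairwise_cons.mp hpair).1
  have hpd : (rest.dropWhile (fun x => x.1 == c.1)).Pairwise (fun a b => a.1 ≤ b.1) :=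
    (List.pairwise_cons.mp hpair).2.sublist hsub
  cases hdw : rest.dropWhile (fun x => x.1 == c.1) with
  | nil => simp
  | cons hh tt =>
    have hhead : ¬ (hh.1 == c.1) = true := by
      have := List.head?_dropWhile_not (fun x => x.1 == c.1) rest
      rw [hdw] at this; simpa using this
    have hhmem : hh ∈ rest := hsub.subset (by rw [hdw]; simp)
    have hch : c.1 < hh.1 := lt_of_le_of_ne (hle hh hhmem) (by simpa using fun e => hhead (by simp [e]))
    intro x hx
    rcases List.mem_cons.mp hx with rfl | hx
    · exact hch
    · have := (List.pairwise_cons.mp (hdw ▸ hpd)).1 x hx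
      omega




lemma takeWhile_eq (c : Int × String) (rest : List (Int × String)) :
    ∀ x ∈ rest.takeWhile (fun x => x.1 == c.1), x.1 = c.1 := by
  intro x hx
  simpa using List.mem_takeWhile_imp hx

lemma pvBacktrack_eq_emit (ys : List (Int × String)) :
    ys.Pairwise (fun a b => a.1 ≤ b.1) →
    ∀ (cur : List (Int × String)) (l : Int × String), cur.getLast? = some l →
    (∀ x ∈ ys, l.1 < x.1) →
    pvBacktrack ys cur = pvEmit (pvCont (l.1 + 1) (pvGroups ys)) cur := by
  induction ys using pvGroups.induct with
  | case1 =>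
    intro _ cur l h _
    simp [pvBacktrack, pvGroups, pvCont, pvEmit]
  | case2 c rest ih =>
    intro hpair cur l hlast hgt
    set tw := rest.takeWhile (fun x => x.1 == c.1) with htw
    set dw := rest.dropWhile (fun x => x.1 == c.1) with hdw
    have hsplit : rest = tw ++ dw := (List.takeWhile_append_dropWhile).symm
    have hpd : dw.Pairwise (fun a b => a.1 ≤ b.1) :=
      (List.pairwise_cons.mp hpair).2.sublist (List.dropWhile_sublist _)
    have hdgt : ∀ x ∈ dw, c.1 < x.1 := dropWhile_gt c rest hpair
    have hgrp : pvGroups (c :: rest) = (c :: tw) :: pvGroups dw := by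
      rw [pvGroups]
    by_cases hc : c.1 = l.1 + 1
    · -- the head group extends the run
      have hgv : ∀ x ∈ c :: tw, x.1 = l.1 + 1 := by
        intro x hx
        rcases List.mem_cons.mp hx with rfl | hx
        · exact hc
        · rw [takeWhile_eq c rest x hx, hc]
      have hys : c :: rest = (c :: tw) ++ dw := by rw [List.cons_append, ← hsplit]
      conv_lhs => rw [hys]
      rw [pvBacktrack_group (c :: tw) dw cur l hlast hgv]
      have hcont : pvCont (l.1 + 1) (pvGroups (c :: rest))
          = (c :: tw) :: pvCont (l.1 + 1 + 1) (pvGroups dw) := by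
        rw [hgrp, pvCont]
        simp [hc]
      rw [hcont, pvEmit]
      congr 1
      · -- per-card extensions
        apply List.flatMap_congr
        intro d hd
        have hlast' : (cur ++ [d]).getLast? = some d := by simp
        have hdv : d.1 = l.1 + 1 := hgv d hd
        rw [ih hpd (cur ++ [d]) d hlast' (by intro x hx; have := hdgt x hx; omega), hdv]
      · -- the run itself: skipping all of dw
        have : pvBacktrack (dw ++ []) cur = pvBacktrack [] cur := by
          apply pvBacktrack_skip dw [] cur l hlast
          intro x hx
          have := hdgt x hx
          omega
        simpa [pvBacktrack] using this
    · -- gap: nothing extends; both sides collapse to the bare run check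
      have hclt : l.1 < c.1 := hgt c (by simp)
      have hnone : ∀ x ∈ c :: rest, x.1 ≠ l.1 + 1 := by
        intro x hx
        rcases List.mem_cons.mp hx with rfl | hx
        · omega
        · have := (List.pairwise_cons.mp hpair).1 x hx
          omega
      have : pvBacktrack ((c :: rest) ++ []) cur = pvBacktrack [] cur :=
        pvBacktrack_skip _ [] cur l hlast hnone
      rw [List.append_nil] at this
      rw [this, hgrp, pvCont]
      have : ((c :: tw).headD (0, "")).1 ≠ l.1 + 1 := by simpa using hc
      simp only [List.headD_cons]
      rw [if_neg (by simpa using hc)]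
      simp [pvBacktrack, pvEmit]


def pvStartSum : List (Int × String) → List (List (Int × String))
  | [] => []
  | d :: post => pvBacktrack post [d] ++ pvStartSum post

lemma pvBacktrack_nil_eq_startSum (ys : List (Int × String)) :
    pvBacktrack ys [] = pvStartSum ys := by
  induction ys with
  | nil => simp [pvBacktrack, pvStartSum]
  | cons c rest ih => simp [pvBacktrack, pvStartSum, ih]

lemma pvStartSum_group (g dw : List (Int × String)) (v : Int) (hg : ∀ x ∈ g, x.1 = v)
    (hpair : dw.Pairwise (fun a b => a.1 ≤ b.1)) (hgt : ∀ x ∈ dw, v < x.1) :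
    pvStartSum (g ++ dw)
      = (g.flatMap fun d => pvEmit (pvCont (v + 1) (pvGroups dw)) [d]) ++ pvStartSum dw := by
  induction g with
  | nil => simp
  | cons d cs ih =>
    have hdv : d.1 = v := hg d (by simp)
    have h1 : pvBacktrack (cs ++ dw) [d] = pvBacktrack dw [d] := by
      apply pvBacktrack_skip cs dw [d] d (by simp)
      intro x hx
      rw [hg x (by simp [hx]), hdv]; omega
    have h2 : pvBacktrack dw [d] = pvEmit (pvCont (v + 1) (pvGroups dw)) [d] := by
      rw [pvBacktrack_eq_emit dw hpair [d] d (by simp)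
          (by intro x hx; rw [hdv]; exact hgt x hx), hdv]
    simp only [List.cons_append, pvStartSum, h1, h2,
      ih (fun x hx => hg x (by simp [hx])), List.flatMap_cons, List.append_assoc]

lemma pvStartSum_eq_starts (ys : List (Int × String)) :
    ys.Pairwise (fun a b => a.1 ≤ b.1) → pvStartSum ys = pvStarts (pvGroups ys) := by
  induction ys using pvGroups.induct with
  | case1 => intro _; simp [pvStartSum, pvStarts, pvGroups]
  | case2 c rest ih =>
    intro hpair
    set tw := rest.takeWhile (fun x => x.1 == c.1) with htw
    set dw := rest.dropWhile (fun x => x.1 == c.1) with hdw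
    have hsplit : rest = tw ++ dw := (List.takeWhile_append_dropWhile).symm
    have hpd : dw.Pairwise (fun a b => a.1 ≤ b.1) :=
      (List.pairwise_cons.mp hpair).2.sublist (List.dropWhile_sublist _)
    have hdgt : ∀ x ∈ dw, c.1 < x.1 := dropWhile_gt c rest hpair
    have hgv : ∀ x ∈ c :: tw, x.1 = c.1 := by
      intro x hx
      rcases List.mem_cons.mp hx with rfl | hx
      · rfl
      · exact takeWhile_eq c rest x hx
    have hys : c :: rest = (c :: tw) ++ dw := by rw [List.cons_append, ← hsplit]
    conv_lhs => rw [hys]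
    rw [pvStartSum_group (c :: tw) dw c.1 hgv hpd hdgt, ih hpd]
    rw [pvGroups, pvStarts]
    simp only [← htw, ← hdw, List.headD_cons]

-- ===== VERDICT (by name: the statement is the Claim_ definition above) =====
theorem find_all_runs_spec : Claim_equal_find_all_runs := by
  intro cards _
  unfold Spec_find_all_runs find_all_runs find_all_runs_alt
  by_cases h3 : cards.length < 3
  · simp [h3]
  · simp only [h3, if_false]
    have hpair := PySem.List.sorted_pairwise cards (fun x => x.1)
    rw [List.filter_eq_self.mpr (by intro r hr; simpa using pvBacktrack_len _ [] r hr),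
        pvBacktrack_nil_eq_startSum, pvStartSum_eq_starts _ hpair]
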